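-- pv_equiv track=rewrite | github.com/tomyf/advent-of-code | y2020/d06/d06.py | count_yeses
-- ===== SOURCE A (Python) =====
-- from typing import List, Tuple
--
-- def count_yeses(data: List[str]) -> int:
--     groups = []
--     current_group = ""
--     for form in data:
--         if not form:
--             groups.append(current_group)
--             current_group = ""
--         else:
--             current_group = current_group + form
--     # Groups are formed
--     unique_questions_per_group = [
--         len(set([letter for letter in group]))
--         for group in groups
--     ]
--     # Count total
--     return sum(unique_questions_per_group)
-- ===== SOURCE B (Python) =====
-- def count_yeses(data):
--     total = 0
--     current = set()
--     for form in data: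
--         if not form:
--             total += len(current)
--             current = set()
--         else:
--             current.update(form)
--     return total
-- ===== Notes on version B (the rewrite author's own statement) =====
-- stated objective: simpler
-- what changed: Single fused pass keeping a running set of letters and a running total, instead of first building concatenated group strings and then a second pass deduplicating each; no intermediate group list or string concatenation.
import Mathlib
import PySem

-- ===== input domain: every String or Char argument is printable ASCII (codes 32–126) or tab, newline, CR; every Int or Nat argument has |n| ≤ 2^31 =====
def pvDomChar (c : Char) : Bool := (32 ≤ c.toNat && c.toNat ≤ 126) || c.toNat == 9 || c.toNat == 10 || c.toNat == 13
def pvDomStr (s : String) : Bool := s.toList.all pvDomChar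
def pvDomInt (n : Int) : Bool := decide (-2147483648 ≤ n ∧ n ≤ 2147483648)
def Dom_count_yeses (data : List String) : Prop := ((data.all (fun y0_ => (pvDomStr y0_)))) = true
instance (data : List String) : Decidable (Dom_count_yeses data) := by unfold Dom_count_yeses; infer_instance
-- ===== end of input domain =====

-- B fuses the two phases into one streaming pass with a running set and total ('simpler').

-- ===== PORT A =====
def count_yeses (data : List String) : Int :=
  let st := data.foldl
    (fun (st : List String × String) form =>
      if form = "" then (st.1 ++ [st.2], "") else (st.1, st.2 ++ form))
    ([], "")
  let uq := st.1.map (fun g => (PySem.Set.len (PySem.Set.ofList g.toList)))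
  uq.foldl (· + ·) 0

-- ===== PORT B =====
def count_yeses_alt (data : List String) : Int :=
  (data.foldl
    (fun (st : Int × PySem.Set Char) form =>
      if form = "" then (st.1 + PySem.Set.len st.2, PySem.Set.empty)
      else (st.1, PySem.Set.update st.2 form.toList))
    (0, PySem.Set.empty)).1

-- ===== PRECONDITION & SPEC =====
def Spec_count_yeses (data : List String) (out : Int) : Prop := out = count_yeses_alt data
instance (data : List String) (out : Int) : Decidable (Spec_count_yeses data out) := by unfold Spec_count_yeses; infer_instance

-- ===== CLAIM (what is proved, stated in full; the proofs are below) =====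
def Claim_equal_count_yeses : Prop := ∀ (data : List String), Dom_count_yeses data → Spec_count_yeses data (count_yeses data)

-- ===== LEMMAS AND PROOFS =====

-- sum of unique-letter counts over a list of group strings
def pvSumLens (l : List String) : Int :=
  (l.map (fun g => PySem.Set.len (PySem.Set.ofList g.toList))).foldl (· + ·) 0

-- A's loop step / B's loop step, named for the proofs
def pvStepA (st : List String × String) (form : String) : List String × String :=
  if form = "" then (st.1 ++ [st.2], "") else (st.1, st.2 ++ form)

def pvStepB (st : Int × PySem.Set Char) (form : String) : Int × PySem.Set Char :=
  if form = "" then (st.1 + PySem.Set.len st.2, PySem.Set.empty)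
  else (st.1, PySem.Set.update st.2 form.toList)

lemma pvFoldlAddShift (l : List Int) (a : Int) :
    l.foldl (· + ·) a = a + l.foldl (· + ·) 0 := by
  induction l generalizing a with
  | nil => simp
  | cons x t ih => simp only [List.foldl_cons]; rw [ih (a + x), ih (0 + x)]; ring

lemma pvSumLens_cons (g : String) (l : List String) :
    pvSumLens (g :: l) = PySem.Set.len (PySem.Set.ofList g.toList) + pvSumLens l := by
  simp only [pvSumLens, List.map_cons, List.foldl_cons]
  rw [pvFoldlAddShift]; simp

lemma pvStepA_prefix (rest : List String) (gs : List String) (c : String) :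
    rest.foldl pvStepA (gs, c) =
      (gs ++ (rest.foldl pvStepA ([], c)).1, (rest.foldl pvStepA ([], c)).2) := by
  induction rest generalizing gs c with
  | nil => simp
  | cons form t ih =>
    simp only [List.foldl_cons, pvStepA]
    by_cases h : form = ""
    · simp only [h, ite_true]
      rw [ih (gs ++ [c]) "", ih ([] ++ [c]) ""]; simp
    · simp only [h, ite_false]
      exact ih gs (c ++ form)

lemma pvUpdate_ofList_append (l1 l2 : List Char) :
    PySem.Set.update (PySem.Set.ofList l1) l2 = PySem.Set.ofList (l1 ++ l2) := by
  simp [PySem.Set.ofList_eq_foldl, PySem.Set.update, List.foldl_append]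

lemma pvLoopB (data : List String) (cur : String) (t : Int) :
    (data.foldl pvStepB (t, PySem.Set.ofList cur.toList)).1 =
      t + pvSumLens (data.foldl pvStepA ([], cur)).1 := by
  induction data generalizing cur t with
  | nil => simp [pvSumLens]
  | cons form rest ih =>
    simp only [List.foldl_cons, pvStepB, pvStepA]
    by_cases h : form = ""
    · simp only [h, ite_true]
      have hempty : (PySem.Set.empty : PySem.Set Char) = PySem.Set.ofList ("" : String).toList := rfl
      rw [hempty, ih "" (t + PySem.Set.len (PySem.Set.ofList cur.toList)),
          pvStepA_prefix rest ([] ++ [cur]) ""]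
      simp only [List.nil_append, List.singleton_append]
      rw [pvSumLens_cons]
      ring
    · simp only [h, ite_false]
      have : PySem.Set.update (PySem.Set.ofList cur.toList) form.toList =
          PySem.Set.ofList (cur ++ form).toList := by
        rw [pvUpdate_ofList_append]; simp
      rw [this]
      exact ih (cur ++ form) t

-- ===== VERDICT (by name: the statement is the Claim_ definition above) =====
theorem count_yeses_spec : Claim_equal_count_yeses := by
  intro data _
  show count_yeses data = count_yeses_alt data
  have hA : count_yeses data = pvSumLens (data.foldl pvStepA ([], "")).1 := rfl
  have hB : count_yeses_alt data = (data.foldl pvStepB (0, PySem.Set.empty)).1 := rfl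
  rw [hA, hB]
  have hempty : (PySem.Set.empty : PySem.Set Char) = PySem.Set.ofList ("" : String).toList := rfl
  rw [hempty, pvLoopB data "" 0, zero_add]
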